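-- pv_equiv track=rewrite | github.com/LazareLive/AutomatedDices | Dice_Script.py | diceNumberAlgorithmSequence
-- ===== SOURCE A (Python) =====
-- import math, os
--
-- def isEven(n):
--     return ((n % 2) == 0)
--
-- def recursiveDiceNumberSequence(order):
--     #There are several "notable" sequences that we will use for the dice number sequence. They are called triad,
--     #tetrad and pentad. As order cannot be less than 3, we will only use these sequences to generate any dice.
--     #The goal will be to divide the number of faces until we can find a sequence. These sequences are generated by
--     #using various calculations on the classic dices.
--     #Tetrad case - Taken on the D3 and D6 dequences
--     if(order == 3):
--         return [3, 1, 2]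
--     #Tetrad case - Taken on the D8 sequence
--     elif(order == 4):
--         return [4, 1, 3, 2]
--     #Pentad case - Taken on the D10 sequence -- to be checked. This does not feel right
--     elif(order == 5):
--         return [5, 1, 4, 2, 3]
--     #For any other cases : use recursion until we find a n-ad sequence
--     newOrder = math.trunc(order / 2)
--     recursiveSequence = recursiveDiceNumberSequence(newOrder)
--     #As the recursiveSequence will send half of the information, creation of a new array
--     numberSequence = [0] * order
--     if(isEven(order)):
--         #On the case of an even order dice, check witch method to use based on the last recursion sequence
--         for i in range(newOrder):
--                 #Generate the even-numbers on one polar side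
--                 numberSequence[i] = recursiveSequence[i] * 2
--                 #Generate the odd_numbers on the other side
--                 if(isEven(newOrder)):
--                     #On the even-even case, the last sequence is repeated to generate the current order
--                     numberSequence[newOrder + i] = numberSequence[i] - 1
--                 else:
--                     #On the even-odd case, the last sequence must be inverted to have a weak-strong alternance
--                     numberSequence[newOrder + i] = ((newOrder - recursiveSequence[i] + 1) * 2) - 1
--     else:
--         #On the case of an odd dice order, generate the dice following these rules
--         #Placement of the first number
--         numberSequence[0] = order
--         #Placement of the recursive sequence
--         for i in range(newOrder):
--             #Generation of the even numbers on a polar side of the order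
--             numberSequence[i + 1] = recursiveSequence[newOrder - i - 1] * 2
--             #Generation of the odd numbers
--             numberSequence[order - (i + 1)] = order - numberSequence[i + 1]
--     #Return the number sequence at the end
--     return numberSequence
--
-- def diceNumberAlgorithmSequence(faces):
--     #First: check the number of asked faces. Cannot be less than 3.
--     if(faces < 3):
--         return [(i + 1) for i in range(faces)]
--     #If the number of faces is 4, a specific array must be returned as this cannot be created by the algorithm, and this is
--     #the only solution for a 4 sided die
--     if(faces == 4):
--         return [4, 2, 1, 3]
--     #In all other cases, we need to check whereas the die is even or odd
--     if(isEven(faces)):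
--         #If it is even, the generation will follow the standard dice number sequence generation as the opposite sides must be
--         #equal to the number of the die faces plus one.
--         #Calculation of the even number sequence
--         evenFaces = math.trunc(faces / 2)
--         numberSequenceOrder = recursiveDiceNumberSequence(evenFaces)
--         for i in range(evenFaces):
--             #For each even number generated (NSO multiplied by 2)
--             numberSequenceOrder[i] = numberSequenceOrder[i] * 2
--             #Creation of the opposite side of the die
--             numberSequenceOrder.append(faces - numberSequenceOrder[i] + 1)
--         return numberSequenceOrder
--     else:
--         #If it is odd, the generation is automatically created by the recursion
--         return recursiveDiceNumberSequence(faces)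
--     #In case of a problem, always send zero
--     return [0]
-- ===== SOURCE B (Python) =====
-- def _iterDiceNumberSequence(order):
--     # Bottom-up version of the recursive sequence generator: record the chain of
--     # orders down to a base case, then rebuild the sequence upward with list
--     # comprehensions instead of index-mutation of a preallocated array.
--     stack = []
--     while order not in (3, 4, 5):
--         stack.append(order)
--         order //= 2
--     seq = {3: [3, 1, 2], 4: [4, 1, 3, 2], 5: [5, 1, 4, 2, 3]}[order]
--     while stack:
--         o = stack.pop()
--         h = o // 2
--         if o % 2 == 0:
--             if h % 2 == 0:
--                 seq = [2 * x for x in seq] + [2 * x - 1 for x in seq]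
--             else:
--                 seq = [2 * x for x in seq] + [2 * (h - x + 1) - 1 for x in seq]
--         else:
--             seq = [o] + [2 * x for x in reversed(seq)] + [o - 2 * x for x in seq]
--     return seq
--
-- def diceNumberAlgorithmSequence(faces):
--     if faces < 3:
--         return list(range(1, faces + 1))
--     if faces == 4:
--         return [4, 2, 1, 3]
--     if faces % 2 == 0:
--         evens = [2 * x for x in _iterDiceNumberSequence(faces // 2)]
--         return evens + [faces - e + 1 for e in evens]
--     return _iterDiceNumberSequence(faces)
-- ===== Notes on version B (the rewrite author's own statement) =====
-- stated objective: alternative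
-- what changed: The top-down recursive sequence builder is replaced by an explicit bottom-up loop: the chain of orders is collected by repeated halving down to a base case, then each level's sequence is rebuilt from the previous one with list comprehensions instead of recursion plus index-mutation of a preallocated array.
import Mathlib
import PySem

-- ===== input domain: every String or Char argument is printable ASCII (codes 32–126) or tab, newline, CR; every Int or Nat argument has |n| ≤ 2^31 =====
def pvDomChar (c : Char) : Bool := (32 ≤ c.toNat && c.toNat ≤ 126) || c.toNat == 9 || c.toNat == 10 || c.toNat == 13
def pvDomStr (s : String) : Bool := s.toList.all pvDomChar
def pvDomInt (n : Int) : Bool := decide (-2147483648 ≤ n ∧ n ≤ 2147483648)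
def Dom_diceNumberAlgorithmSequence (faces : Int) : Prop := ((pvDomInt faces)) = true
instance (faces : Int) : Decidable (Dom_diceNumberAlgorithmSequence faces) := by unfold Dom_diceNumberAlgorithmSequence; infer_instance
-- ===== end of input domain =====

-- B replaces the top-down recursive helper by an explicit bottom-up loop over the chain of
-- orders, rebuilding each level with list comprehensions instead of index-mutating a
-- preallocated array (objective: alternative decomposition, same cost).

-- ===== PORT A =====
-- Port of `recursiveDiceNumberSequence`.  Every reachable call has order ≥ 3 (the top level
-- passes faces ≥ 3 or faces/2 ≥ 3 and the recursion keeps order/2 ≥ 3), so the argument is a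
-- Nat and the `order < 3` branch is only a totality guard (Python would recurse forever there;
-- it is never reached).  `numberSequence[i] = v` becomes List.set, reads become getD
-- (always in range on reachable inputs); `math.trunc(order/2)` on a nonnegative int is
-- exactly Nat division.
def recursiveDiceNumberSequenceA (order : Nat) : List Int :=
  if order = 3 then [3, 1, 2]
  else if order = 4 then [4, 1, 3, 2]
  else if order = 5 then [5, 1, 4, 2, 3]
  else if order < 3 then []   -- unreachable totality guard
  else
    let newOrder := order / 2
    let recursiveSequence := recursiveDiceNumberSequenceA newOrder
    if order % 2 = 0 then
      (List.range newOrder).foldl (fun ns i =>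
        let ns := ns.set i (recursiveSequence.getD i 0 * 2)
        ns.set (newOrder + i)
          (if newOrder % 2 = 0 then ns.getD i 0 - 1
           else ((newOrder : Int) - recursiveSequence.getD i 0 + 1) * 2 - 1))
        (List.replicate order (0 : Int))
    else
      (List.range newOrder).foldl (fun ns i =>
        let ns := ns.set (i + 1) (recursiveSequence.getD (newOrder - i - 1) 0 * 2)
        ns.set (order - (i + 1)) ((order : Int) - ns.getD (i + 1) 0))
        ((List.replicate order (0 : Int)).set 0 (order : Int))
termination_by order
decreasing_by omega

def diceNumberAlgorithmSequence (faces : Int) : List Int :=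
  if faces < 3 then (PySem.List.pyRange 0 faces 1).map (· + 1)
  else if faces = 4 then [4, 2, 1, 3]
  else if faces % 2 = 0 then
    -- faces ≥ 6 here, so math.trunc(faces/2) = faces / 2 ≥ 3, taken as a Nat for the helper
    let evenFaces := (faces / 2).toNat
    let numberSequenceOrder := recursiveDiceNumberSequenceA evenFaces
    (List.range evenFaces).foldl (fun ns i =>
      let ns := ns.set i (ns.getD i 0 * 2)
      ns ++ [faces - ns.getD i 0 + 1]) numberSequenceOrder
  else recursiveDiceNumberSequenceA faces.toNat

-- ===== PORT B =====
-- Port of Source B.  The `while order not in (3,4,5)` descent collecting the stack; popping the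
-- Python list from its end = folding over this front-accumulated list from its head.
def diceStack (order : Nat) (acc : List Nat) : Nat × List Nat :=
  if order = 3 ∨ order = 4 ∨ order = 5 then (order, acc)
  else if order < 3 then (order, acc)   -- unreachable totality guard
  else diceStack (order / 2) (order :: acc)
termination_by order
decreasing_by omega

-- one pass of Source B's rebuild loop body
def diceStep (seq : List Int) (o : Nat) : List Int :=
  let h := o / 2
  if o % 2 = 0 then
    if h % 2 = 0 then seq.map (fun x => 2 * x) ++ seq.map (fun x => 2 * x - 1)
    else seq.map (fun x => 2 * x) ++ seq.map (fun x => 2 * ((h : Int) - x + 1) - 1)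
  else (o : Int) :: (seq.reverse.map (fun x => 2 * x) ++ seq.map (fun x => (o : Int) - 2 * x))

def iterDiceNumberSequence (order : Nat) : List Int :=
  let p := diceStack order []
  let base :=
    if p.1 = 3 then [3, 1, 2]
    else if p.1 = 4 then [4, 1, 3, 2]
    else if p.1 = 5 then [5, 1, 4, 2, 3]
    else []   -- unreachable (would be a KeyError in Python; never hit for order ≥ 3)
  p.2.foldl diceStep base

def diceNumberAlgorithmSequence_alt (faces : Int) : List Int :=
  if faces < 3 then PySem.List.pyRange 1 (faces + 1) 1
  else if faces = 4 then [4, 2, 1, 3]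
  else if faces % 2 = 0 then
    let evens := (iterDiceNumberSequence (faces / 2).toNat).map (fun x => 2 * x)
    evens ++ evens.map (fun e => faces - e + 1)
  else iterDiceNumberSequence faces.toNat

-- ===== PRECONDITION & SPEC =====
def Spec_diceNumberAlgorithmSequence (faces : Int) (out : List Int) : Prop := out = diceNumberAlgorithmSequence_alt faces
instance (faces : Int) (out : List Int) : Decidable (Spec_diceNumberAlgorithmSequence faces out) := by unfold Spec_diceNumberAlgorithmSequence; infer_instance

-- ===== CLAIM (what is proved, stated in full; the proofs are below) =====
def Claim_equal_diceNumberAlgorithmSequence : Prop := ∀ (faces : Int), Dom_diceNumberAlgorithmSequence faces → Spec_diceNumberAlgorithmSequence faces (diceNumberAlgorithmSequence faces)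

-- ===== LEMMAS AND PROOFS =====

lemma replicate_set_last {α : Type} (m : Nat) (c v : α) (hm : 1 ≤ m) :
    (List.replicate m c).set (m - 1) v = List.replicate (m - 1) c ++ [v] := by
  apply List.ext_getElem
  · simp; omega
  · intro j hj1 hj2
    simp only [List.length_set, List.length_replicate] at hj1
    by_cases h : j < m - 1
    · rw [List.getElem_set, if_neg (by omega), List.getElem_replicate,
        List.getElem_append_left (by simp; omega), List.getElem_replicate]
    · rw [List.getElem_set, if_pos (by omega), List.getElem_append_right (by simp; omega)]
      simp

lemma set_replicate_head {α : Type} (xs rest : List α) (m n : Nat) (c v : α)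
    (hm : 1 ≤ m) (hn : n = xs.length) :
    (xs ++ (List.replicate m c ++ rest)).set n v
      = xs ++ ([v] ++ (List.replicate (m - 1) c ++ rest)) := by
  subst hn
  rw [List.set_append, if_neg (by omega), Nat.sub_self,
    show m = (m - 1) + 1 from by omega, List.replicate_succ]
  simp

lemma set_replicate_last {α : Type} (xs rest : List α) (m n : Nat) (c v : α)
    (hm : 1 ≤ m) (hn : n = xs.length + (m - 1)) :
    (xs ++ (List.replicate m c ++ rest)).set n v
      = xs ++ (List.replicate (m - 1) c ++ ([v] ++ rest)) := by
  subst hn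
  rw [List.set_append, if_neg (by omega), Nat.add_sub_cancel_left,
    List.set_append, if_pos (by simp; omega)]
  simp [replicate_set_last m c v hm]

lemma getD_append_at {α : Type} [Inhabited α] (xs rest : List α) (n : Nat) (v d : α)
    (hn : n = xs.length) :
    (xs ++ ([v] ++ rest)).getD n d = v := by
  subst hn
  rw [List.getD_eq_getElem _ _ (by simp)]
  simp

lemma set_append_at {α : Type} (xs rest : List α) (n : Nat) (w v : α) (hn : n = xs.length) :
    (xs ++ ([w] ++ rest)).set n v = xs ++ ([v] ++ rest) := by
  subst hn
  rw [List.set_append, if_neg (by omega), Nat.sub_self]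
  rfl

-- invariant of A's even-order fill loop
lemma evenFold_inv (h' : Nat) (a b : Nat → Int) (k : Nat) (hk : k ≤ h') :
    (List.range k).foldl (fun ns i =>
        let ns2 := ns.set i (a i)
        ns2.set (h' + i) (if h' % 2 = 0 then ns2.getD i 0 - 1 else b i))
      (List.replicate (2 * h') (0 : Int))
    = (List.range k).map a ++ (List.replicate (h' - k) 0
      ++ ((List.range k).map (fun i => if h' % 2 = 0 then a i - 1 else b i)
          ++ List.replicate (h' - k) 0)) := by
  induction k with
  | zero => simp [two_mul]
  | succ k ih =>
    rw [List.range_succ, List.foldl_append, ih (by omega)]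
    simp only [List.foldl_cons, List.foldl_nil]
    rw [set_replicate_head _ _ _ _ _ _ (by omega) (by simp)]
    rw [getD_append_at _ _ _ _ _ (by simp)]
    rw [show (List.range k).map a ++ ([a k] ++ (List.replicate (h' - k - 1) 0
          ++ ((List.range k).map (fun i => if h' % 2 = 0 then a i - 1 else b i)
              ++ List.replicate (h' - k) 0)))
        = ((List.range k).map a ++ [a k] ++ List.replicate (h' - k - 1) 0
            ++ (List.range k).map (fun i => if h' % 2 = 0 then a i - 1 else b i))
          ++ (List.replicate (h' - k) 0 ++ []) from by simp]
    rw [set_replicate_head _ _ _ _ _ _ (by omega) (by simp; omega)]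
    simp
    rw [show h' - k - 1 = h' - (k + 1) from by omega]

-- invariant of A's odd-order fill loop
lemma oddFold_inv (h' : Nat) (e : Nat → Int) (oi : Int) (k : Nat) (hk : k ≤ h') :
    (List.range k).foldl (fun ns i =>
        let ns2 := ns.set (i + 1) (e i)
        ns2.set (2 * h' + 1 - (i + 1)) (oi - ns2.getD (i + 1) 0))
      ((List.replicate (2 * h' + 1) (0 : Int)).set 0 oi)
    = oi :: ((List.range k).map e ++ (List.replicate (2 * h' - 2 * k) 0
             ++ ((List.range k).map (fun i => oi - e i)).reverse)) := by
  induction k with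
  | zero => simp [List.replicate_succ]
  | succ k ih =>
    rw [List.range_succ, List.foldl_append, ih (by omega)]
    simp only [List.foldl_cons, List.foldl_nil]
    rw [show oi :: ((List.range k).map e ++ (List.replicate (2 * h' - 2 * k) 0
          ++ ((List.range k).map (fun i => oi - e i)).reverse))
        = (oi :: (List.range k).map e) ++ (List.replicate (2 * h' - 2 * k) 0
          ++ ((List.range k).map (fun i => oi - e i)).reverse) from by simp]
    rw [set_replicate_head _ _ _ _ _ _ (by omega) (by simp)]
    rw [getD_append_at _ _ _ _ _ (by simp)]
    rw [show (oi :: (List.range k).map e) ++ ([e k] ++ (List.replicate (2 * h' - 2 * k - 1) 0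
          ++ ((List.range k).map (fun i => oi - e i)).reverse))
        = ((oi :: (List.range k).map e) ++ [e k]) ++ (List.replicate (2 * h' - 2 * k - 1) 0
          ++ ((List.range k).map (fun i => oi - e i)).reverse) from by simp]
    rw [set_replicate_last _ _ _ _ _ _ (by omega) (by simp; omega)]
    simp
    rw [show 2 * h' - 2 * k - 1 - 1 = 2 * h' - 2 * (k + 1) from by omega]

-- invariant of the top-level even-faces loop
lemma topFold_inv (faces : Int) (nso : List Int) (k : Nat) (hk : k ≤ nso.length) :
    (List.range k).foldl (fun ns i =>
        let ns2 := ns.set i (ns.getD i 0 * 2)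
        ns2 ++ [faces - ns2.getD i 0 + 1]) nso
    = (nso.take k).map (fun x => x * 2)
      ++ (nso.drop k ++ (nso.take k).map (fun x => faces - x * 2 + 1)) := by
  induction k with
  | zero => simp
  | succ k ih =>
    rw [List.range_succ, List.foldl_append, ih (by omega)]
    simp only [List.foldl_cons, List.foldl_nil]
    rw [List.drop_eq_getElem_cons (show k < nso.length from by omega)]
    rw [show (nso.take k).map (fun x => x * 2) ++ ((nso[k] :: nso.drop (k + 1))
          ++ (nso.take k).map (fun x => faces - x * 2 + 1))
        = (nso.take k).map (fun x => x * 2) ++ ([nso[k]] ++ (nso.drop (k + 1)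
          ++ (nso.take k).map (fun x => faces - x * 2 + 1))) from by
        simp only [List.cons_append, List.nil_append]]
    rw [getD_append_at _ _ _ _ _ (by simp; omega)]
    rw [set_append_at _ _ _ _ _ (by simp; omega)]
    rw [getD_append_at _ _ _ _ _ (by simp; omega)]
    simp
    rw [List.take_succ_eq_append_getElem (l := nso.map (fun x => x * 2))
          (show k < (nso.map (fun x => x * 2)).length from by simp; omega),
        List.take_succ_eq_append_getElem (l := nso.map (fun x => faces - x * 2 + 1))
          (show k < (nso.map (fun x => faces - x * 2 + 1)).length from by simp; omega)]
    simp
    rfl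

lemma map_range_getD (rs : List Int) (F : Int → Int) :
    (List.range rs.length).map (fun i => F (rs.getD i 0)) = rs.map F := by
  apply List.ext_getElem <;> simp
  intro i hi _
  rw [List.getElem?_eq_getElem hi]
  rfl

lemma map_range_getD_rev (rs : List Int) (F : Int → Int) :
    (List.range rs.length).map (fun i => F (rs.getD (rs.length - i - 1) 0)) = (rs.map F).reverse := by
  apply List.ext_getElem <;> simp
  intro i hi _
  rw [show rs.length - i - 1 = rs.length - 1 - i from by omega,
    List.getElem?_eq_getElem (show rs.length - 1 - i < rs.length from by omega)]
  rfl

-- one unrolling of A's recursion, expressed with B's step function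
lemma recA_step (n : Nat) (hn : 6 ≤ n)
    (hl : (recursiveDiceNumberSequenceA (n / 2)).length = n / 2) :
    recursiveDiceNumberSequenceA n = diceStep (recursiveDiceNumberSequenceA (n / 2)) n := by
  rw [recursiveDiceNumberSequenceA.eq_def (order := n)]
  rw [if_neg (by omega), if_neg (by omega), if_neg (by omega), if_neg (by omega)]
  simp only []
  set rs := recursiveDiceNumberSequenceA (n / 2) with hrs
  by_cases hpar : n % 2 = 0
  · rw [if_pos hpar]
    have hfold := evenFold_inv (n / 2) (fun i => rs.getD i 0 * 2)
        (fun i => (((n / 2 : Nat) : Int) - rs.getD i 0 + 1) * 2 - 1) (n / 2) le_rfl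
    beta_reduce at hfold
    rw [show 2 * (n / 2) = n from by omega] at hfold
    rw [hfold]
    simp only [Nat.sub_self, List.replicate_zero, List.append_nil]
    rw [diceStep]
    simp only [if_pos hpar]
    by_cases hp2 : n / 2 % 2 = 0
    · simp only [if_pos hp2]
      rw [← hl, map_range_getD rs (fun x => x * 2),
          map_range_getD rs (fun x => x * 2 - 1)]
      simp only [List.nil_append]
      refine congrArg₂ (· ++ ·) ?_ ?_ <;>
        · apply List.map_congr_left; intro x _; ring
    · simp only [if_neg hp2]
      rw [← hl, map_range_getD rs (fun x => x * 2),
          map_range_getD rs (fun x => ((rs.length : Int) - x + 1) * 2 - 1)]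
      simp only [List.nil_append]
      refine congrArg₂ (· ++ ·) ?_ ?_ <;>
        · apply List.map_congr_left; intro x _; ring
  · rw [if_neg hpar]
    have hfold := oddFold_inv (n / 2) (fun i => rs.getD (n / 2 - i - 1) 0 * 2)
        ((n : Int)) (n / 2) le_rfl
    beta_reduce at hfold
    rw [show 2 * (n / 2) + 1 = n from by omega] at hfold
    rw [hfold]
    simp only [Nat.sub_self, List.replicate_zero, List.nil_append]
    rw [← hl, map_range_getD_rev rs (fun x => x * 2),
        map_range_getD_rev rs (fun x => (n : Int) - x * 2), List.reverse_reverse]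
    rw [diceStep]
    simp only [if_neg hpar, List.map_reverse]
    refine congrArg₂ (fun a b => List.cons a b) rfl (congrArg₂ (· ++ ·) ?_ ?_)
    · refine congrArg List.reverse ?_
      apply List.map_congr_left; intro x _; ring
    · apply List.map_congr_left; intro x _; ring

lemma diceStack_acc (n : Nat) : ∀ acc, diceStack n acc = ((diceStack n []).1, (diceStack n []).2 ++ acc) := by
  induction n using Nat.strong_induction_on with
  | _ n ih =>
    intro acc
    rw [diceStack.eq_def (order := n) (acc := acc), diceStack.eq_def (order := n) (acc := [])]
    by_cases h3 : n = 3 ∨ n = 4 ∨ n = 5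
    · simp [h3]
    · by_cases hlt : n < 3
      · simp [h3, hlt]
      · simp only [h3, hlt, if_false]
        rw [ih (n / 2) (by omega) (n :: acc), ih (n / 2) (by omega) [n]]
        simp

-- one unrolling of B's while-loops
lemma iterSeq_step (n : Nat) (hn : 6 ≤ n) :
    iterDiceNumberSequence n = diceStep (iterDiceNumberSequence (n / 2)) n := by
  unfold iterDiceNumberSequence
  rw [diceStack.eq_def (order := n) (acc := []), if_neg (by omega), if_neg (by omega), diceStack_acc]
  simp

lemma diceStep_len (s : List Int) (o : Nat) :
    (diceStep s o).length = if o % 2 = 0 then 2 * s.length else 2 * s.length + 1 := by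
  simp only [diceStep]
  split_ifs <;> simp <;> omega

-- the heart of the file: A's recursive helper = B's bottom-up loop, plus the length invariant
lemma main_equiv (n : Nat) (hn : 3 ≤ n) :
    recursiveDiceNumberSequenceA n = iterDiceNumberSequence n
      ∧ (recursiveDiceNumberSequenceA n).length = n := by
  induction n using Nat.strong_induction_on with
  | _ n ih =>
    by_cases h3 : n = 3 ∨ n = 4 ∨ n = 5
    · have e3 : ∀ m ∈ [3, 4, 5], recursiveDiceNumberSequenceA m = iterDiceNumberSequence m
          ∧ (recursiveDiceNumberSequenceA m).length = m := by
        intro m hm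
        fin_cases hm <;>
          exact ⟨by rw [recursiveDiceNumberSequenceA.eq_def]; rw [iterDiceNumberSequence,
            diceStack.eq_def]; norm_num,
            by rw [recursiveDiceNumberSequenceA.eq_def]; norm_num⟩
      rcases h3 with h | h | h <;> subst h <;> exact e3 _ (by norm_num)
    · have hn6 : 6 ≤ n := by omega
      obtain ⟨ihe, ihl⟩ := ih (n / 2) (by omega) (by omega)
      have h1 := recA_step n hn6 ihl
      have h2 := iterSeq_step n hn6
      refine ⟨by rw [h1, h2, ihe], ?_⟩
      rw [h1, diceStep_len, ihl]
      split_ifs with hp <;> omega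

-- ===== VERDICT (by name: the statement is the Claim_ definition above) =====
theorem diceNumberAlgorithmSequence_spec : Claim_equal_diceNumberAlgorithmSequence := by
  intro faces _
  unfold Spec_diceNumberAlgorithmSequence diceNumberAlgorithmSequence diceNumberAlgorithmSequence_alt
  by_cases hlt : faces < 3
  · rw [if_pos hlt, if_pos hlt]
    rw [PySem.List.pyRange_one, PySem.List.pyRange_one]
    rw [show faces - 0 = faces from by ring, show faces + 1 - 1 = faces from by ring, List.map_map]
    apply List.map_congr_left
    intro k _
    simp [Function.comp]
    ring
  · rw [if_neg hlt, if_neg hlt]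
    by_cases h4 : faces = 4
    · rw [if_pos h4, if_pos h4]
    · rw [if_neg h4, if_neg h4]
      by_cases hev : faces % 2 = 0
      · rw [if_pos hev, if_pos hev]
        simp only []
        have hef : 3 ≤ (faces / 2).toNat := by omega
        obtain ⟨heq, hlen⟩ := main_equiv ((faces / 2).toNat) hef
        have hfold := topFold_inv faces (recursiveDiceNumberSequenceA ((faces / 2).toNat))
            ((faces / 2).toNat) (le_of_eq hlen.symm)
        rw [hfold, List.take_of_length_le (le_of_eq hlen),
          List.drop_eq_nil_of_le (le_of_eq hlen), heq]
        simp only [List.nil_append, List.map_map]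
        refine congrArg₂ (· ++ ·) ?_ ?_ <;>
          · apply List.map_congr_left; intro x _
            try simp only [Function.comp_apply]
            ring
      · rw [if_neg hev, if_neg hev]
        exact (main_equiv faces.toNat (by omega)).1
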